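-- pv_equiv track=rewrite | github.com/gregpedis/programming_languages_1 | project_3/part_2/round.py | distances_are_valid
-- ===== SOURCE A (Python) =====
-- from collections import deque as Queue
--
-- def distances_are_valid(distances:Queue, last=0):
--     current = distances.pop()
--     diff = current - (sum(distances) - last)
--     if diff > 1:
--         return False
--     elif diff < -1:
--         return distances_are_valid(distances, current)
--     else:
--         return True
-- ===== SOURCE B (Python) =====
-- # Iterative scan from the right with an incrementally maintained remaining-sum
-- # instead of re-summing the queue on each recursive call.
-- # Mutates `distances` by popping the examined elements, like the original.
-- def distances_are_valid(distances, last=0):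
--     total = sum(distances)
--     while True:
--         current = distances.pop()  # raises IndexError on empty, like the original
--         total -= current
--         diff = current - (total - last)
--         if diff > 1:
--             return False
--         if diff >= -1:
--             return True
--         last = current
-- ===== Notes on version B (the rewrite author's own statement) =====
-- stated objective: alternative
-- what changed: Replaces the recursion that re-sums the whole remaining queue on every call with a single right-to-left iterative pass that maintains the remaining sum incrementally.
-- outside the precondition, e.g. on distances_are_valid([-3], 0): A raises IndexError, B raises IndexError
import Mathlib
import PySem

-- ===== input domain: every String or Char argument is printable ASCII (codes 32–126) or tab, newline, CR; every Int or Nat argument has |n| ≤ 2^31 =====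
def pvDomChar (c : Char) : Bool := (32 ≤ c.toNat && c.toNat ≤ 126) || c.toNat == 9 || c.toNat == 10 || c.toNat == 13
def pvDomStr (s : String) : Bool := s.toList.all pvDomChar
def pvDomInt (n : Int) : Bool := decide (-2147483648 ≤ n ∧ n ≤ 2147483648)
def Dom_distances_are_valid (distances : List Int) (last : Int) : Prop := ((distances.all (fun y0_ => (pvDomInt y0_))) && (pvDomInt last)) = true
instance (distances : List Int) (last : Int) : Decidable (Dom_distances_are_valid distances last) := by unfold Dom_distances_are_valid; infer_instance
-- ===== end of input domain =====

-- B replaces A's recursion that re-sums the queue on each call with a single right-to-left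
-- pass maintaining a running remaining sum (alternative decomposition; no speed claim);
-- both Pythons pop the examined elements in place (equivalence proved about the return value).

-- ===== PORT A =====
-- A: pop from the right, sum the remaining queue, recurse with `current` as `last`.
-- On the empty queue A raises IndexError; the port returns false there (outside Pre_).
def distances_are_valid (distances : List Int) (last : Int) : Bool :=
  match hm : PySem.List.pop? distances with
  | none => false  -- A raises IndexError here (pop from an empty deque); outside Pre_
  | some (current, rest) =>
    let diff := current - (rest.sum - last)
    if diff > 1 then false
    else if diff < -1 then distances_are_valid rest current
    else true
termination_by distances.length
decreasing_by
  have h := PySem.List.length_of_pop?_eq_some distances hm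
  simp at h
  omega

-- ===== PORT B =====
-- B: one pass over the reversed list carrying the running sum `total` of the elements
-- not yet examined; exhaustion (A's raise / B's raise) maps to false (outside Pre_).
def pvAltLoop : List Int → Int → Int → Bool
  | [], _, _ => false
  | current :: rev, total, last =>
    let total' := total - current
    let diff := current - (total' - last)
    if diff > 1 then false
    else if diff ≥ -1 then true
    else pvAltLoop rev total' current

def distances_are_valid_alt (distances : List Int) (last : Int) : Bool :=
  pvAltLoop distances.reverse distances.sum last

-- ===== PRECONDITION & SPEC =====
-- Pre_ excludes exactly the inputs on which the Python A raises IndexError (pop from an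
-- empty deque: every step's diff stays < -1 until the queue is exhausted); Python B
-- raises IndexError on exactly the same inputs.
def Pre_distances_are_valid (distances : List Int) (last : Int) : Prop :=
  ∃ i < distances.length,
    (distances.getD i 0) -
      ((distances.take i).sum -
        (if i + 1 < distances.length then distances.getD (i + 1) 0 else last)) ≥ -1
instance (distances : List Int) (last : Int) : Decidable (Pre_distances_are_valid distances last) := by
  unfold Pre_distances_are_valid; infer_instance

def pvWitness_distances_are_valid : List Int × Int := ([3, 2], 0)

def Spec_distances_are_valid (distances : List Int) (last : Int) (out : Bool) : Prop := out = distances_are_valid_alt distances last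
instance (distances : List Int) (last : Int) (out : Bool) : Decidable (Spec_distances_are_valid distances last out) := by unfold Spec_distances_are_valid; infer_instance

-- ===== CLAIM (what is proved, stated in full; the proofs are below) =====
def Claim_equal_distances_are_valid : Prop := ∀ (distances : List Int) (last : Int), Dom_distances_are_valid distances last → Pre_distances_are_valid distances last → Spec_distances_are_valid distances last (distances_are_valid distances last)

-- ===== LEMMAS AND PROOFS =====

-- The two ports agree on every input (both map exhaustion to false).
theorem pv_eq_all (distances : List Int) (last : Int) :
    distances_are_valid distances last
      = pvAltLoop distances.reverse distances.sum last := by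
  induction distances using List.reverseRecOn generalizing last with
  | nil =>
    rw [distances_are_valid.eq_def]
    split
    · rfl
    · next current rest hm =>
      rw [show PySem.List.pop? ([] : List Int) = none from rfl] at hm
      exact (by cases hm)
  | append_singleton ys c ih =>
    rw [distances_are_valid.eq_def, PySem.List.pop?_last]
    simp only [List.reverse_append, List.reverse_cons, List.reverse_nil, List.nil_append,
      List.cons_append, List.sum_append, List.sum_cons, List.sum_nil]
    have htot : ys.sum + (c + 0) - c = ys.sum := by ring
    simp only [pvAltLoop, htot]
    by_cases h1 : c - (ys.sum - last) > 1
    · simp [h1]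
    · by_cases h2 : c - (ys.sum - last) < -1
      · have h3 : ¬ (c - (ys.sum - last) ≥ -1) := by omega
        simp [h1, h3, ih]
      · have h3 : c - (ys.sum - last) ≥ -1 := by omega
        simp [h1, h2, h3]

-- ===== VERDICT (by name: the statement is the Claim_ definition above) =====
theorem distances_are_valid_spec : Claim_equal_distances_are_valid := by
  intro distances last _ _
  unfold Spec_distances_are_valid distances_are_valid_alt
  exact pv_eq_all distances last
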